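-- pv_equiv track=rewrite | github.com/exueyuan/dpc_parser_module | mylib/txt_lib.py | all_letter_or_number
-- ===== SOURCE A (Python) =====
-- def all_letter_or_number(text, ignore_chars=""):
--     for ch in text:
--         if ignore_chars.find(ch) >= 0:
--             continue
--         if '0' <= ch <= '9':  # or ch == '.' or ch == '+' or ch == '-'
--             continue
--         elif 'A' <= ch <= 'Z' or 'a' <= ch <= 'z' or ch == '_':
--             continue
--         else:
--             return False
--     return True
-- ===== SOURCE B (Python) =====
-- _VALID = set("0123456789ABCDEFGHIJKLMNOPQRSTUVWXYZabcdefghijklmnopqrstuvwxyz_")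
--
-- def all_letter_or_number(text, ignore_chars=""):
--     return set(text) - set(ignore_chars) <= _VALID
-- ===== Notes on version B (the rewrite author's own statement) =====
-- stated objective: simpler
-- what changed: Replaces the per-character early-return scan (with a substring .find per character) by building set(text), subtracting set(ignore_chars), and one subset test against a precomputed valid-character set.
import Mathlib
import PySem

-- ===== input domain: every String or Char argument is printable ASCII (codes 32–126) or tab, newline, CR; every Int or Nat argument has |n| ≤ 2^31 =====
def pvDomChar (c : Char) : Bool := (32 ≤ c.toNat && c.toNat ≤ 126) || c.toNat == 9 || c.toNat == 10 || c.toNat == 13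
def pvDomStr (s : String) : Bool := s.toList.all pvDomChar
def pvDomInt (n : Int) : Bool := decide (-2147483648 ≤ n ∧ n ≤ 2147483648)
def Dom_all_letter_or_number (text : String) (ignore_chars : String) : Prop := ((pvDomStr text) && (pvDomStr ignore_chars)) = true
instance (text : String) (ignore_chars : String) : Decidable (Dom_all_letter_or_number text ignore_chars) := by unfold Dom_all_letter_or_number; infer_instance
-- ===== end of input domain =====

-- B replaces A's per-character early-return scan by one subset test: set(text) - set(ignore_chars) against a precomputed valid set (simpler).


-- ===== PORT A =====
-- the for-loop over text with continue/early return, as structural recursion over the chars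
def allLonLoop (ignore_chars : String) : List Char → Bool
  | [] => true
  | ch :: rest =>
    if PySem.Str.find ignore_chars (String.ofList [ch]) ≥ 0 then allLonLoop ignore_chars rest
    else if '0' ≤ ch ∧ ch ≤ '9' then allLonLoop ignore_chars rest
    else if ('A' ≤ ch ∧ ch ≤ 'Z') ∨ ('a' ≤ ch ∧ ch ≤ 'z') ∨ ch = '_' then allLonLoop ignore_chars rest
    else false

def all_letter_or_number (text : String) (ignore_chars : String) : Bool :=
  allLonLoop ignore_chars text.toList

-- ===== PORT B =====
-- _VALID = set("0123…z_")
def lonValid : PySem.Set Char :=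
  PySem.Set.ofList "0123456789ABCDEFGHIJKLMNOPQRSTUVWXYZabcdefghijklmnopqrstuvwxyz_".toList

-- set(text) - set(ignore_chars) <= _VALID
def all_letter_or_number_alt (text : String) (ignore_chars : String) : Bool :=
  PySem.Set.issubset
    (PySem.Set.diff (PySem.Set.ofList text.toList) (PySem.Set.ofList ignore_chars.toList))
    lonValid

-- ===== PRECONDITION & SPEC =====
def Spec_all_letter_or_number (text : String) (ignore_chars : String) (out : Bool) : Prop := out = all_letter_or_number_alt text ignore_chars
instance (text : String) (ignore_chars : String) (out : Bool) : Decidable (Spec_all_letter_or_number text ignore_chars out) := by unfold Spec_all_letter_or_number; infer_instance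

-- ===== CLAIM (what is proved, stated in full; the proofs are below) =====
def Claim_equal_all_letter_or_number : Prop := ∀ (text : String) (ignore_chars : String), Dom_all_letter_or_number text ignore_chars → Spec_all_letter_or_number text ignore_chars (all_letter_or_number text ignore_chars)

-- ===== LEMMAS AND PROOFS =====

-- [c] is an infix of l iff c is an element of l
theorem infix_single (l : List Char) (c : Char) : [c] <:+: l ↔ c ∈ l := by
  constructor
  · intro h; exact h.sublist.subset (List.mem_singleton_self c)
  · intro h
    obtain ⟨s, t, rfl⟩ := List.mem_iff_append.mp h
    exact ⟨s, t, by simp⟩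

-- ignore_chars.find(ch) >= 0 iff ch occurs in ignore_chars
theorem find_single_nonneg (s : String) (c : Char) :
    PySem.Str.find s (String.ofList [c]) ≥ 0 ↔ c ∈ s.toList := by
  rw [ge_iff_le, PySem.Str.find_eq, PySem.Chars.find_nonneg_iff]
  simp only [String.toList_ofList]
  exact infix_single s.toList c

-- the valid-set string, as an explicit char list
theorem lonValid_chars :
    "0123456789ABCDEFGHIJKLMNOPQRSTUVWXYZabcdefghijklmnopqrstuvwxyz_".toList = ['0', '1', '2', '3', '4', '5', '6', '7', '8', '9', 'A', 'B', 'C', 'D', 'E', 'F', 'G', 'H', 'I', 'J', 'K', 'L', 'M', 'N', 'O', 'P', 'Q', 'R', 'S', 'T', 'U', 'V', 'W', 'X', 'Y', 'Z', 'a', 'b', 'c', 'd', 'e', 'f', 'g', 'h', 'i', 'j', 'k', 'l', 'm', 'n', 'o', 'p', 'q', 'r', 's', 't', 'u', 'v', 'w', 'x', 'y', 'z', '_'] := rfl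

-- a char is in the valid set iff it is a digit, a letter or '_'
theorem mem_lonValid (c : Char) :
    c ∈ lonValid ↔ ('0' ≤ c ∧ c ≤ '9') ∨ (('A' ≤ c ∧ c ≤ 'Z') ∨ ('a' ≤ c ∧ c ≤ 'z') ∨ c = '_') := by
  unfold lonValid
  rw [PySem.Set.mem_ofList, lonValid_chars]
  constructor
  · intro h
    fin_cases h <;> decide
  · have hc : Char.ofNat c.toNat = c := Char.ofNat_toNat c
    rintro (⟨h1, h2⟩ | ⟨h1, h2⟩ | ⟨h1, h2⟩ | rfl)
    · have hbl : 48 ≤ c.toNat := h1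
      have hbr : c.toNat ≤ 57 := h2
      set n := c.toNat with hn
      interval_cases n <;> (rw [← hc]; decide)
    · have hbl : 65 ≤ c.toNat := h1
      have hbr : c.toNat ≤ 90 := h2
      set n := c.toNat with hn
      interval_cases n <;> (rw [← hc]; decide)
    · have hbl : 97 ≤ c.toNat := h1
      have hbr : c.toNat ≤ 122 := h2
      set n := c.toNat with hn
      interval_cases n <;> (rw [← hc]; decide)
    · decide

-- A's loop returns true iff every remaining char is ignored or valid
theorem allLonLoop_eq_all (ignore_chars : String) (l : List Char) :
    allLonLoop ignore_chars l = true ↔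
      ∀ c ∈ l, c ∈ ignore_chars.toList ∨ c ∈ lonValid := by
  induction l with
  | nil => simp [allLonLoop]
  | cons ch rest ih =>
    simp only [allLonLoop, List.mem_cons, forall_eq_or_imp]
    split_ifs with h1 h2 h3
    · rw [ih]; simp [(find_single_nonneg _ _).mp h1]
    · rw [ih]; simp [(mem_lonValid ch).mpr (Or.inl h2)]
    · rw [ih]; simp [(mem_lonValid ch).mpr (Or.inr h3)]
    · simp only [false_iff]
      rintro ⟨hch, -⟩
      rcases hch with hig | hval
      · exact h1 ((find_single_nonneg _ _).mpr hig)
      · rcases (mem_lonValid ch).mp hval with hd | ho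
        · exact h2 hd
        · exact h3 ho

-- ===== VERDICT (by name: the statement is the Claim_ definition above) =====
theorem all_letter_or_number_spec : Claim_equal_all_letter_or_number := by
  intro text ignore_chars _
  unfold Spec_all_letter_or_number all_letter_or_number all_letter_or_number_alt
  rw [Bool.eq_iff_iff, allLonLoop_eq_all, PySem.Set.issubset_iff]
  constructor
  · intro h c hc
    simp only [PySem.Set.mem_diff, PySem.Set.mem_ofList] at hc
    rcases h c hc.1 with h' | h'
    · exact absurd h' hc.2
    · exact h'
  · intro h c hc
    by_cases hi : c ∈ ignore_chars.toList
    · exact Or.inl hi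
    · exact Or.inr (h c (by simp only [PySem.Set.mem_diff, PySem.Set.mem_ofList]; exact ⟨hc, hi⟩))
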